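-- pv_equiv track=rewrite | github.com/manwar/perlweeklychallenge-club | challenge-169/lubos-kolouch/python/ch-1.py | brilliant_numbers
-- ===== SOURCE A (Python) =====
-- def _factor_two_primes(n: int) -> tuple[int, int] | None:
--     """Return the two prime factors (with multiplicity) if n has exactly 2 prime factors."""
--     if n < 2:
--         return None
--
--     factors: list[int] = []
--     x = n
--     p = 2
--     while p * p <= x and len(factors) <= 2:
--         while x % p == 0:
--             factors.append(p)
--             x //= p
--             if len(factors) > 2:
--                 return None
--         p = 3 if p == 2 else p + 2
--     if x > 1:
--         factors.append(x)
--     if len(factors) != 2: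
--         return None
--     return factors[0], factors[1]
--
-- def is_brilliant_number(n: int) -> bool:
--     """Return True if n is a brilliant number."""
--     factors = _factor_two_primes(n)
--     if factors is None:
--         return False
--     a, b = factors
--     return len(str(a)) == len(str(b))
--
-- def brilliant_numbers(count: int) -> list[int]:
--     """Return the first `count` brilliant numbers."""
--     if count <= 0:
--         raise ValueError("Expected count > 0")
--     out: list[int] = []
--     n = 1
--     while len(out) < count:
--         n += 1
--         if is_brilliant_number(n):
--             out.append(n)
--     return out
-- ===== SOURCE B (Python) =====
-- def _is_prime(n):
--     if n < 2:
--         return False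
--     if n % 2 == 0:
--         return n == 2
--     f = 3
--     while f * f <= n:
--         if n % f == 0:
--             return False
--         f += 2
--     return True
--
--
-- def brilliant_numbers(count):
--     # Brilliant numbers with 2d-1 or 2d digits are exactly the products of two
--     # d-digit primes, and those product blocks occupy disjoint, increasing
--     # ranges [10^(2d-2), 10^(2d)).  So emit the blocks in order of d.
--     if count <= 0:
--         raise ValueError("Expected count > 0")
--     out = []
--     d = 1
--     while len(out) < count:
--         lo = 2 if d == 1 else 10 ** (d - 1)
--         hi = 10 ** d
--         primes = [p for p in range(lo, hi) if _is_prime(p)]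
--         prods = sorted(p * q for i, p in enumerate(primes) for q in primes[i:])
--         out += prods
--         d += 1
--     return out[:count]
-- ===== Notes on version B (the rewrite author's own statement) =====
-- stated objective: faster
-- what changed: Instead of scanning every integer and trial-factoring each one, B sieves the primes of each digit length d, multiplies the same-length prime pairs, sorts each product block and concatenates the blocks (which occupy disjoint increasing ranges), taking the first count products.
import Mathlib
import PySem

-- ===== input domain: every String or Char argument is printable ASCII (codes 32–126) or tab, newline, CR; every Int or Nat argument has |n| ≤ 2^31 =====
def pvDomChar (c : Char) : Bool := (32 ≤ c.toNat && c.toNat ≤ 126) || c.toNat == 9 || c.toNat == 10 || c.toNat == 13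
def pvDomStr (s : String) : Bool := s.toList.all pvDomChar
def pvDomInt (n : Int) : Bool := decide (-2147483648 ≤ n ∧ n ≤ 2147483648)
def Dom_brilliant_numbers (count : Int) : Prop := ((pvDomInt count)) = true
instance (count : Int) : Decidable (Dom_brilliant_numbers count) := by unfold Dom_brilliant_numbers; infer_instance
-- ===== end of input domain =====

-- B replaces A's scan-every-integer-and-trial-factor search by per-digit-length prime
-- generation: multiply same-digit-length prime pairs, sort each block, concatenate
-- (objective: faster; measured).

-- ===== PORT A =====

-- inner `while x % p == 0` loop of _factor_two_primes; the fuel argument only makes the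
-- structural recursion total (callers pass enough fuel, proved below)
def pvFactInner (fuel : Nat) (x p : Int) (fs : List Int) : Option (Int × List Int) :=
  match fuel with
  | 0 => some (x, fs)
  | fuel + 1 =>
    if PySem.Int.mod x p = 0 then
      if 2 < (fs ++ [p]).length then none
      else pvFactInner fuel (PySem.Int.floordiv x p) p (fs ++ [p])
    else some (x, fs)

-- outer `while p * p <= x and len(factors) <= 2` loop, again with a totality fuel
def pvFactOuter (fuel : Nat) (x p : Int) (fs : List Int) : Option (Int × List Int) :=
  match fuel with
  | 0 => some (x, fs)
  | fuel + 1 =>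
    if p * p ≤ x ∧ (fs.length : Int) ≤ 2 then
      match pvFactInner (x.toNat + 1) x p fs with
      | none => none
      | some (x', fs') => pvFactOuter fuel x' (if p = 2 then 3 else p + 2) fs'
    else some (x, fs)

def pvFactorTwo (n : Int) : Option (Int × Int) :=
  if n < 2 then none else
  match pvFactOuter (n.toNat + 1) n 2 [] with
  | none => none
  | some (x, fs) =>
    match (if 1 < x then fs ++ [x] else fs) with
    | [a, b] => some (a, b)
    | _ => none

def pvIsBrilliant (n : Int) : Bool :=
  match pvFactorTwo n with
  | none => false
  | some (a, b) => PySem.Str.len (PySem.Int.toStr a) == PySem.Str.len (PySem.Int.toStr b)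

-- `while len(out) < count:` search loop of brilliant_numbers (fuel = totality guard;
-- brilliant_numbers passes enough, proved below)
def pvLoopA (fuel : Nat) (count : Int) (out : List Int) (n : Int) : List Int :=
  match fuel with
  | 0 => out
  | fuel + 1 =>
    if (out.length : Int) < count then
      if pvIsBrilliant (n + 1) then pvLoopA fuel count (out ++ [n + 1]) (n + 1)
      else pvLoopA fuel count out (n + 1)
    else out

def brilliant_numbers (count : Int) : List Int :=
  if count ≤ 0 then []  -- Python raises ValueError here; excluded by Pre_
  else pvLoopA (10 ^ (2 * count.toNat)) count [] 1

-- ===== PORT B =====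

-- `while f * f <= n` loop of _is_prime (fuel = totality guard)
def pvPrimeLoop (fuel : Nat) (n f : Int) : Bool :=
  match fuel with
  | 0 => true
  | fuel + 1 =>
    if f * f ≤ n then
      if PySem.Int.mod n f = 0 then false else pvPrimeLoop fuel n (f + 2)
    else true

def pvIsPrime (n : Int) : Bool :=
  if n < 2 then false
  else if PySem.Int.mod n 2 = 0 then n == 2
  else pvPrimeLoop n.toNat n 3

-- sorted(...) of plain ints, ported as Lean's standard mergeSort (stable, same order)
def pvProds (primes : List Int) : List Int :=
  ((PySem.List.enumerate primes).flatMap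
    (fun ip => (PySem.List.slice primes (some ip.1) none).map (fun q => ip.2 * q))).mergeSort
    (fun a b => decide (a ≤ b))

-- `while len(out) < count:` block loop of B (fuel = totality guard; count.toNat blocks
-- always suffice since every block is nonempty, proved below)
def pvLoopB (fuel : Nat) (count : Int) (out : List Int) (d : Int) : List Int :=
  match fuel with
  | 0 => out
  | fuel + 1 =>
    if (out.length : Int) < count then
      pvLoopB fuel count
        (out ++ pvProds ((PySem.List.pyRange (if d == 1 then 2 else 10 ^ (d - 1).toNat)
          (10 ^ d.toNat) 1).filter pvIsPrime))
        (d + 1)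
    else out

-- Source B raises ValueError on count <= 0 exactly as A does; that region is outside Pre_,
-- so the port carries no guard for it
def brilliant_numbers_alt (count : Int) : List Int :=
  PySem.List.slice (pvLoopB count.toNat count [] 1) none (some count)

-- ===== PRECONDITION & SPEC =====
-- Pre_ excludes exactly count ≤ 0, where both Pythons raise ValueError
def Pre_brilliant_numbers (count : Int) : Prop := 1 ≤ count
instance (count : Int) : Decidable (Pre_brilliant_numbers count) := by unfold Pre_brilliant_numbers; infer_instance
def pvWitness_brilliant_numbers : Int := 1

def Spec_brilliant_numbers (count : Int) (out : List Int) : Prop := out = brilliant_numbers_alt count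
instance (count : Int) (out : List Int) : Decidable (Spec_brilliant_numbers count out) := by unfold Spec_brilliant_numbers; infer_instance

-- ===== CLAIM (what is proved, stated in full; the proofs are below) =====
def Claim_equal_brilliant_numbers : Prop := ∀ (count : Int), Dom_brilliant_numbers count → Pre_brilliant_numbers count → Spec_brilliant_numbers count (brilliant_numbers count)

-- ===== LEMMAS AND PROOFS =====

-- ---- arithmetic toolbox: integer primality and number of prime factors ----

def IntPrime (a : Int) : Prop := 2 ≤ a ∧ a.toNat.Prime

def pvOmega (x : Int) : Nat := (Nat.primeFactorsList x.toNat).length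

theorem pvOmega_mul (a b : Int) (ha : 1 ≤ a) (hb : 1 ≤ b) :
    pvOmega (a * b) = pvOmega a + pvOmega b := by
  unfold pvOmega
  have h : (a * b).toNat = a.toNat * b.toNat := by
    have ha' : a = (a.toNat : Int) := by omega
    have hb' : b = (b.toNat : Int) := by omega
    rw [ha', hb', ← Nat.cast_mul, Int.toNat_natCast, Int.toNat_natCast, Int.toNat_natCast]
  rw [h, (Nat.perm_primeFactorsList_mul (by omega) (by omega)).length_eq, List.length_append]

theorem pvOmega_prime (a : Int) (ha : IntPrime a) : pvOmega a = 1 := by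
  unfold pvOmega
  rw [Nat.primeFactorsList_prime ha.2]
  rfl

theorem pvOmega_one : pvOmega 1 = 0 := by simp [pvOmega]

theorem pvOmega_pos (a : Int) (ha : 2 ≤ a) : 1 ≤ pvOmega a := by
  unfold pvOmega
  rcases List.eq_nil_or_concat (a.toNat.primeFactorsList) with h | ⟨l, x, h⟩
  · exfalso
    have := Nat.prod_primeFactorsList (n := a.toNat) (by omega)
    rw [h] at this
    simp at this
    omega
  · rw [h]; simp

theorem pvOmega_pow_dvd (p : Int) (e : Nat) (x : Int) (hp : 2 ≤ p) (hx : 1 ≤ x)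
    (h : p ^ e ∣ x) : e ≤ pvOmega x := by
  obtain ⟨y, rfl⟩ := h
  have hppos : (0 : Int) < p := by omega
  have hpe : (0 : Int) < p ^ e := pow_pos hppos e
  have hy : 1 ≤ y := by
    rcases lt_or_ge y 1 with h | h
    · exfalso; nlinarith
    · exact h
  have hstep : ∀ e' : Nat, e' ≤ pvOmega (p ^ e') := by
    intro e'
    induction e' with
    | zero => simp
    | succ k ih =>
      have hpk : (0 : Int) < p ^ k := pow_pos hppos k
      rw [pow_succ, pvOmega_mul _ _ (by omega) (by omega)]
      have := pvOmega_pos p hp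
      omega
  rw [pvOmega_mul _ _ (by omega) hy]
  have := hstep e
  omega

theorem pvOmega_prod (l : List Int) (h : ∀ f ∈ l, IntPrime f) :
    1 ≤ l.prod ∧ pvOmega l.prod = l.length := by
  induction l with
  | nil => exact ⟨le_refl _, pvOmega_one⟩
  | cons a t ih =>
    obtain ⟨ha2, hap⟩ := h a (by simp)
    obtain ⟨h1, h2⟩ := ih (fun f hf => h f (by simp [hf]))
    rw [List.prod_cons]
    constructor
    · nlinarith
    · rw [pvOmega_mul _ _ (by omega) h1, pvOmega_prime _ ⟨ha2, hap⟩, h2, List.length_cons]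
      omega

-- ---- correctness of A's trial-division loops ----

theorem pvInner_some (p : Int) (hp : 2 ≤ p) :
    ∀ (fuel : Nat) (x : Int) (fs : List Int) (x' : Int) (fs' : List Int),
    1 ≤ x → x < (fuel : Int) → pvFactInner fuel x p fs = some (x', fs') →
    ∃ e : Nat, fs' = fs ++ List.replicate e p ∧ x = p ^ e * x' ∧ 1 ≤ x' ∧ ¬ (p ∣ x') ∧
      fs'.length = fs.length + e ∧ (fs.length ≤ 2 → fs'.length ≤ 2) := by
  intro fuel
  induction fuel with
  | zero =>
    intro x fs a b hx hf h
    exfalso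
    simp only [Nat.cast_zero] at hf
    omega
  | succ fuel ih =>
    intro x fs a b hx hf h
    rw [pvFactInner] at h
    by_cases hm : PySem.Int.mod x p = 0
    · rw [if_pos hm] at h
      by_cases hlen : 2 < (fs ++ [p]).length
      · rw [if_pos hlen] at h
        exact absurd h (by simp)
      · rw [if_neg hlen] at h
        have hdvd : p ∣ x := (PySem.Int.mod_eq_zero_iff_dvd x p).mp hm
        have hxq : PySem.Int.floordiv x p = x / p := PySem.Int.floordiv_eq_ediv_of_pos (by omega)
        have hc : x / p * p = x := Int.ediv_mul_cancel hdvd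
        have hxp1 : 1 ≤ x / p := by nlinarith
        have hxlt : x / p < x := by nlinarith
        have hxle : x ≤ (fuel : Int) := by push_cast at hf; omega
        have hflt : x / p < (fuel : Int) := lt_of_lt_of_le hxlt hxle
        rw [hxq] at h
        obtain ⟨e, he1, he2, he3, he4, he5, he6⟩ := ih (x / p) (fs ++ [p]) a b hxp1 hflt h
        refine ⟨e + 1, ?_, ?_, he3, he4, ?_, ?_⟩
        · rw [he1]
          simp [List.replicate_succ, List.append_assoc]
        · rw [pow_succ]
          nlinarith [he2]
        · rw [he5]
          simp only [List.length_append, List.length_cons, List.length_nil]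
          omega
        · intro _
          exact he6 (Nat.not_lt.mp hlen)
    · rw [if_neg hm] at h
      simp only [Option.some.injEq, Prod.mk.injEq] at h
      obtain ⟨rfl, rfl⟩ := h
      refine ⟨0, by simp, by simp, hx, ?_, by simp, by simp⟩
      intro hdvd
      exact hm ((PySem.Int.mod_eq_zero_iff_dvd x p).mpr hdvd)

theorem pvInner_none (p : Int) (hp : 2 ≤ p) :
    ∀ (fuel : Nat) (x : Int) (fs : List Int), 1 ≤ x → x < (fuel : Int) → fs.length ≤ 2 →
    pvFactInner fuel x p fs = none →
    ∃ e : Nat, 1 ≤ e ∧ p ^ e ∣ x ∧ fs.length + e = 3 := by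
  intro fuel
  induction fuel with
  | zero =>
    intro x fs hx hf hlen2 h
    exfalso
    simp only [Nat.cast_zero] at hf
    omega
  | succ fuel ih =>
    intro x fs hx hf hlen2 h
    rw [pvFactInner] at h
    by_cases hm : PySem.Int.mod x p = 0
    · rw [if_pos hm] at h
      by_cases hlen : 2 < (fs ++ [p]).length
      · refine ⟨1, le_refl _, by simpa using (PySem.Int.mod_eq_zero_iff_dvd x p).mp hm, ?_⟩
        simp only [List.length_append, List.length_cons, List.length_nil] at hlen
        omega
      · rw [if_neg hlen] at h
        have hdvd : p ∣ x := (PySem.Int.mod_eq_zero_iff_dvd x p).mp hm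
        have hxq : PySem.Int.floordiv x p = x / p := PySem.Int.floordiv_eq_ediv_of_pos (by omega)
        have hc : x / p * p = x := Int.ediv_mul_cancel hdvd
        have hxp1 : 1 ≤ x / p := by nlinarith
        have hxlt : x / p < x := by nlinarith
        have hxle : x ≤ (fuel : Int) := by push_cast at hf; omega
        have hflt : x / p < (fuel : Int) := lt_of_lt_of_le hxlt hxle
        rw [hxq] at h
        have hlen' : (fs ++ [p]).length ≤ 2 := by omega
        obtain ⟨e, he0, he1, he2⟩ := ih (x / p) (fs ++ [p]) hxp1 hflt hlen' h
        refine ⟨e + 1, by omega, ?_, ?_⟩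
        · obtain ⟨c, hc'⟩ := he1
          refine ⟨c, ?_⟩
          rw [pow_succ]
          nlinarith
        · simp only [List.length_append, List.length_cons, List.length_nil] at he2
          omega
    · rw [if_neg hm] at h
      exact absurd h (by simp)

def FactInv (x p : Int) (fs : List Int) : Prop :=
  1 ≤ x ∧ 2 ≤ p ∧ (p = 2 ∨ p % 2 = 1) ∧
  (∀ r : Nat, r.Prime → (r : Int) < p → ¬ ((r : Int) ∣ x)) ∧
  (∀ f ∈ fs, IntPrime f ∧ f ≤ p) ∧ fs.Pairwise (· ≤ ·) ∧ fs.length ≤ 2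

def FactPost (x₀ : Int) (fs₀ : List Int) (x₂ : Int) (fs₂ : List Int) : Prop :=
  1 ≤ x₂ ∧ fs₀.prod * x₀ = fs₂.prod * x₂ ∧ (∀ f ∈ fs₂, IntPrime f) ∧
  fs₂.Pairwise (· ≤ ·) ∧ (x₂ = 1 ∨ (IntPrime x₂ ∧ ∀ f ∈ fs₂, f ≤ x₂)) ∧ fs₂.length ≤ 2

-- the integer left over at loop exit is 1 or prime, and at least every recorded factor
theorem pvExitCase (x p : Int) (fs : List Int) (hinv : FactInv x p fs) (hpx : ¬ p * p ≤ x) :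
    FactPost x fs x fs := by
  obtain ⟨hx, hp, hodd, hnod, hfs, hpair, hlen⟩ := hinv
  refine ⟨hx, rfl, fun f hf => (hfs f hf).1, hpair, ?_, hlen⟩
  rcases eq_or_lt_of_le hx with h1 | h1
  · exact Or.inl h1.symm
  · right
    have hx2 : 2 ≤ x := by omega
    have hxt : 2 ≤ x.toNat := by omega
    have hrp : x.toNat.minFac.Prime := Nat.minFac_prime (by omega)
    have hrd : (x.toNat.minFac : Int) ∣ x := by
      have h := Nat.minFac_dvd x.toNat
      have : ((x.toNat : Int)) = x := by omega
      rw [← this]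
      exact_mod_cast h
    have hple : p ≤ (x.toNat.minFac : Int) := by
      by_contra hc
      exact hnod _ hrp (by omega) hrd
    have hprime : x.toNat.Prime := by
      by_contra hc
      have := Nat.minFac_sq_le_self (by omega) hc
      have hcast : ((x.toNat.minFac ^ 2 : Nat) : Int) ≤ x := by
        have : ((x.toNat : Int)) = x := by omega
        rw [← this]
        exact_mod_cast Nat.minFac_sq_le_self (by omega) hc
      push_cast at hcast
      nlinarith
    refine ⟨⟨hx2, hprime⟩, fun f hf => ?_⟩
    have h1 := (hfs f hf).2
    have h2 : (x.toNat.minFac : Int) ≤ x := by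
      have h := Nat.le_of_dvd (by omega) (Nat.minFac_dvd x.toNat)
      omega
    omega

theorem pvStepInv (x p x' : Int) (fs : List Int) (e : Nat)
    (hinv : FactInv x p fs) (hx' : 1 ≤ x') (hxe : x = p ^ e * x') (hnd : ¬ (p ∣ x'))
    (hlen' : fs.length + e ≤ 2) :
    FactInv x' (if p = 2 then 3 else p + 2) (fs ++ List.replicate e p) := by
  obtain ⟨hx, hp, hodd, hnod, hfs, hpair, hlen⟩ := hinv
  have hpp : e ≠ 0 → IntPrime p := by
    intro he
    refine ⟨hp, ?_⟩
    by_contra hc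
    have hs2 : 2 ≤ p.toNat.minFac := (Nat.minFac_prime (by omega)).two_le
    have hsq := Nat.minFac_sq_le_self (by omega) hc
    have hslt : (p.toNat.minFac : Int) < p := by
      have h1 : p.toNat.minFac * p.toNat.minFac ≤ p.toNat := by nlinarith [hsq]
      have h2 : p.toNat.minFac < p.toNat := by nlinarith
      omega
    have hsd : (p.toNat.minFac : Int) ∣ x := by
      have h1 : (p.toNat.minFac : Int) ∣ p := by
        have h := Nat.minFac_dvd p.toNat
        have h2 : ((p.toNat : Int)) = p := by omega
        rw [← h2]
        exact_mod_cast h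
      have h2 : p ∣ x := by
        rw [hxe]
        exact Dvd.dvd.mul_right (dvd_pow_self p he) x'
      exact h1.trans h2
    exact hnod _ (Nat.minFac_prime (by omega)) hslt hsd
  have hxdvd : x' ∣ x := ⟨p ^ e, by rw [hxe]; ring⟩
  refine ⟨hx', by split <;> omega, by split <;> omega, ?_, ?_, ?_, ?_⟩
  · intro r hr hrlt hrd
    have hple : (2 : Int) ≤ r := by exact_mod_cast hr.two_le
    rcases lt_trichotomy ((r : Int)) p with h | h | h
    · exact hnod r hr h (hrd.trans hxdvd)
    · rw [h] at hrd
      exact hnd hrd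
    · -- p < r < next p: r = p + 1 is even, prime even means r = 2 < p, contradiction
      have hrpp : (r : Int) = p + 1 := by
        by_cases hp2 : p = 2
        · subst hp2
          rw [if_pos rfl] at hrlt
          omega
        · rw [if_neg hp2] at hrlt
          omega
      have hpodd : p % 2 = 1 := by
        rcases hodd with rfl | h'
        · omega
        · exact h'
      have hreven : 2 ∣ r := by
        have : (r : Int) % 2 = 0 := by omega
        have h2 : (2 : Int) ∣ (r : Int) := by omega
        exact_mod_cast h2
      have := (Nat.Prime.even_iff hr).mp (even_iff_two_dvd.mpr hreven)
      omega
  · intro f hf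
    rcases List.mem_append.mp hf with h | h
    · obtain ⟨h1, h2⟩ := hfs f h
      refine ⟨h1, by split <;> omega⟩
    · have hfp := List.eq_of_mem_replicate h
      subst hfp
      have he0 : e ≠ 0 := by
        intro h0
        rw [h0] at h
        simp at h
      exact ⟨hpp he0, by split <;> omega⟩
  · rw [List.pairwise_append]
    refine ⟨hpair, List.pairwise_replicate_of_refl, ?_⟩
    intro a ha b hb
    have h1 := (hfs a ha).2
    have h2 := List.eq_of_mem_replicate hb
    omega
  · rw [List.length_append, List.length_replicate]
    omega

theorem pvOuter_some :
    ∀ (fuel : Nat) (x p : Int) (fs : List Int) (x₂ : Int) (fs₂ : List Int),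
    FactInv x p fs → x + 2 - p < (fuel : Int) →
    pvFactOuter fuel x p fs = some (x₂, fs₂) → FactPost x fs x₂ fs₂ := by
  intro fuel
  induction fuel with
  | zero =>
    intro x p fs a b hinv hf h
    rw [pvFactOuter] at h
    simp only [Option.some.injEq, Prod.mk.injEq] at h
    obtain ⟨rfl, rfl⟩ := h
    apply pvExitCase x p fs hinv
    have hx := hinv.1
    have hp := hinv.2.1
    simp only [Nat.cast_zero] at hf
    nlinarith
  | succ fuel ih =>
    intro x p fs a b hinv hf h
    rw [pvFactOuter] at h
    have hx := hinv.1
    have hp := hinv.2.1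
    have hlen := hinv.2.2.2.2.2.2
    by_cases hg : p * p ≤ x ∧ (fs.length : Int) ≤ 2
    · rw [if_pos hg] at h
      cases hm : pvFactInner (x.toNat + 1) x p fs with
      | none =>
        rw [hm] at h
        exact absurd h (by simp)
      | some xs =>
        obtain ⟨x', fs'⟩ := xs
        rw [hm] at h
        have hxf : x < ((x.toNat + 1 : Nat) : Int) := by push_cast; omega
        obtain ⟨e, he1, he2, he3, he4, he5, he6⟩ :=
          pvInner_some p hp (x.toNat + 1) x fs x' fs' hx hxf hm
        have hlen2 : fs.length + e ≤ 2 := by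
          have := he6 (by exact_mod_cast hlen)
          omega
        have hinv' := pvStepInv x p x' fs e hinv he3 he2 he4 hlen2
        rw [← he1] at hinv'
        have hpe : (1 : Int) ≤ p ^ e := one_le_pow₀ (by omega)
        have hx'le : x' ≤ x := by nlinarith
        have hf' : x' + 2 - (if p = 2 then 3 else p + 2) < (fuel : Int) := by
          push_cast at hf
          split <;> omega
        obtain ⟨q1, q2, q3, q4, q5, q6⟩ := ih x' _ fs' a b hinv' hf' h
        refine ⟨q1, ?_, q3, q4, q5, q6⟩
        rw [← q2, he1]
        rw [List.prod_append, List.prod_replicate]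
        rw [he2]
        ring
    · rw [if_neg hg] at h
      simp only [Option.some.injEq, Prod.mk.injEq] at h
      obtain ⟨rfl, rfl⟩ := h
      apply pvExitCase x p fs hinv
      intro hc
      exact hg ⟨hc, by exact_mod_cast hlen⟩

theorem pvOuter_none :
    ∀ (fuel : Nat) (x p : Int) (fs : List Int),
    FactInv x p fs → x + 2 - p < (fuel : Int) →
    pvFactOuter fuel x p fs = none → 3 ≤ fs.length + pvOmega x := by
  intro fuel
  induction fuel with
  | zero =>
    intro x p fs hinv hf h
    rw [pvFactOuter] at h
    exact absurd h (by simp)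
  | succ fuel ih =>
    intro x p fs hinv hf h
    rw [pvFactOuter] at h
    have hx := hinv.1
    have hp := hinv.2.1
    have hlen := hinv.2.2.2.2.2.2
    by_cases hg : p * p ≤ x ∧ (fs.length : Int) ≤ 2
    · rw [if_pos hg] at h
      cases hm : pvFactInner (x.toNat + 1) x p fs with
      | none =>
        have hxf : x < ((x.toNat + 1 : Nat) : Int) := by push_cast; omega
        obtain ⟨e, he0, he1, he2⟩ :=
          pvInner_none p hp (x.toNat + 1) x fs hx hxf (by exact_mod_cast hg.2) hm
        have := pvOmega_pow_dvd p e x hp hx he1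
        omega
      | some xs =>
        obtain ⟨x', fs'⟩ := xs
        rw [hm] at h
        have hxf : x < ((x.toNat + 1 : Nat) : Int) := by push_cast; omega
        obtain ⟨e, he1, he2, he3, he4, he5, he6⟩ :=
          pvInner_some p hp (x.toNat + 1) x fs x' fs' hx hxf hm
        have hlen2 : fs.length + e ≤ 2 := by
          have := he6 (by exact_mod_cast hlen)
          omega
        have hinv' := pvStepInv x p x' fs e hinv he3 he2 he4 hlen2
        rw [← he1] at hinv'
        have hpe : (1 : Int) ≤ p ^ e := one_le_pow₀ (by omega)
        have hx'le : x' ≤ x := by nlinarith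
        have hf' : x' + 2 - (if p = 2 then 3 else p + 2) < (fuel : Int) := by
          push_cast at hf
          split <;> omega
        have hq := ih x' _ fs' hinv' hf' h
        have hOx : pvOmega x = pvOmega (p ^ e) + pvOmega x' := by
          rw [he2, pvOmega_mul _ _ (by omega) he3]
        have hOe : e ≤ pvOmega (p ^ e) := pvOmega_pow_dvd p e _ hp (by omega) dvd_rfl
        omega
    · rw [if_neg hg] at h
      exact absurd h (by simp)

-- unique factorisation of a semiprime into an ordered pair of primes
theorem pvUF (p q r s : Nat) (hp : p.Prime) (hq : q.Prime) (hr : r.Prime) (hs : s.Prime)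
    (hpq : p ≤ q) (hrs : r ≤ s) (h : p * q = r * s) : p = r ∧ q = s := by
  have hpd : p ∣ r * s := ⟨q, h.symm⟩
  have hp_cases : p = r ∨ p = s := by
    rcases (Nat.Prime.dvd_mul hp).mp hpd with h' | h'
    · exact Or.inl ((Nat.prime_dvd_prime_iff_eq hp hr).mp h')
    · exact Or.inr ((Nat.prime_dvd_prime_iff_eq hp hs).mp h')
  rcases hp_cases with rfl | rfl
  · constructor
    · rfl
    · have := Nat.eq_of_mul_eq_mul_left hp.pos h
      omega
  · -- p = s: then r ≤ s = p ≤ q forces everything equal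
    have h1 : r ≤ p := hrs
    have h2 : q = r := by
      have := h
      rw [mul_comm r p] at this
      exact (Nat.eq_of_mul_eq_mul_left hp.pos this)
    omega


theorem pvSemiUnique (a b c d : Int) (ha : IntPrime a) (hb : IntPrime b) (hc : IntPrime c)
    (hd : IntPrime d) (hab : a ≤ b) (hcd : c ≤ d) (h : a * b = c * d) : a = c ∧ b = d := by
  have ha2 := ha.1
  have hb2 := hb.1
  have hc2 := hc.1
  have hd2 := hd.1
  have e1 : ((a.toNat : Int)) = a := by omega
  have e2 : ((b.toNat : Int)) = b := by omega
  have e3 : ((c.toNat : Int)) = c := by omega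
  have e4 : ((d.toNat : Int)) = d := by omega
  have hN : a.toNat * b.toNat = c.toNat * d.toNat := by
    have hcast : ((a.toNat * b.toNat : Nat) : Int) = ((c.toNat * d.toNat : Nat) : Int) := by
      push_cast
      rw [e1, e2, e3, e4]
      exact h
    exact_mod_cast hcast
  obtain ⟨u1, u2⟩ := pvUF a.toNat b.toNat c.toNat d.toNat ha.2 hb.2 hc.2 hd.2 (by omega) (by omega) hN
  omega

theorem pvFactorTwo_char (n : Int) (h2 : 2 ≤ n) :
    (∃ a b, pvFactorTwo n = some (a, b) ∧ IntPrime a ∧ IntPrime b ∧ a ≤ b ∧ a * b = n ∧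
      pvOmega n = 2) ∨
    (pvFactorTwo n = none ∧ pvOmega n ≠ 2) := by
  have hinv : FactInv n 2 [] := by
    refine ⟨by omega, le_refl _, Or.inl rfl, ?_, by simp, by simp, by simp⟩
    intro r hr hrlt
    have := hr.two_le
    exfalso
    omega
  have hfuel : n + 2 - 2 < ((n.toNat + 1 : Nat) : Int) := by push_cast; omega
  cases houter : pvFactOuter (n.toNat + 1) n 2 [] with
  | none =>
    right
    have hO := pvOuter_none (n.toNat + 1) n 2 [] hinv hfuel houter
    simp only [List.length_nil] at hO
    have hred : pvFactorTwo n = none := by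
      unfold pvFactorTwo
      rw [if_neg (by omega), houter]
    exact ⟨hred, by omega⟩
  | some xfs =>
    obtain ⟨x, fs⟩ := xfs
    obtain ⟨q1, q2, q3, q4, q5, q6⟩ := pvOuter_some (n.toNat + 1) n 2 [] x fs hinv hfuel houter
    simp only [List.prod_nil, one_mul] at q2
    have hall : ∀ f ∈ (if 1 < x then fs ++ [x] else fs), IntPrime f := by
      intro f hf
      by_cases hx1 : 1 < x
      · rw [if_pos hx1] at hf
        rcases List.mem_append.mp hf with h | h
        · exact q3 f h
        · rcases q5 with rfl | ⟨hxp, _⟩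
          · omega
          · simp at h
            subst h
            exact hxp
      · rw [if_neg hx1] at hf
        exact q3 f hf
    have hpair : (if 1 < x then fs ++ [x] else fs).Pairwise (· ≤ ·) := by
      by_cases hx1 : 1 < x
      · rw [if_pos hx1]
        rw [List.pairwise_append]
        refine ⟨q4, by simp, ?_⟩
        intro a ha b hb
        simp at hb
        subst hb
        rcases q5 with rfl | ⟨_, hle⟩
        · omega
        · exact hle a ha
      · rw [if_neg hx1]
        exact q4
    have hprod : (if 1 < x then fs ++ [x] else fs).prod = n := by
      by_cases hx1 : 1 < x
      · rw [if_pos hx1, List.prod_append]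
        simp [q2]
      · rw [if_neg hx1]
        have hx : x = 1 := by omega
        rw [hx] at q2
        simp at q2
        omega
    have hred : pvFactorTwo n = (match (if 1 < x then fs ++ [x] else fs) with
        | [a, b] => some (a, b) | _ => none) := by
      unfold pvFactorTwo
      rw [if_neg (by omega), houter]
    generalize hfs3 : (if 1 < x then fs ++ [x] else fs) = fs3 at hall hpair hprod hred
    have homega : pvOmega n = fs3.length := by
      rw [← hprod]
      exact (pvOmega_prod fs3 hall).2
    rcases fs3 with _ | ⟨c, _ | ⟨d, _ | ⟨e, t⟩⟩⟩
    · right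
      exact ⟨hred.trans rfl, by rw [homega]; simp⟩
    · right
      exact ⟨hred.trans rfl, by rw [homega]; simp⟩
    · left
      have hcd : c * d = n := by
        simp at hprod
        linarith [hprod]
      refine ⟨c, d, hred.trans rfl, hall c (by simp), hall d (by simp), ?_, hcd, by rw [homega]; rfl⟩
      have := List.pairwise_cons.mp hpair
      exact this.1 d (by simp)
    · right
      refine ⟨hred.trans rfl, ?_⟩
      rw [homega]
      simp

-- ---- decimal digit count = Nat.log 10 + 1 ----

theorem pvTdcLen : ∀ (f n : Nat) (l : List Char), n < f →
    (Nat.toDigitsCore 10 f n l).length = Nat.log 10 n + 1 + l.length := by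
  intro f
  induction f with
  | zero => intro n l h; omega
  | succ f ih =>
    intro n l h
    rw [Nat.toDigitsCore]
    by_cases h0 : n / 10 = 0
    · rw [if_pos h0]
      have : n < 10 := by omega
      rw [Nat.log_of_lt this]
      simp only [List.length_cons]
      omega
    · rw [if_neg h0]
      have h10 : 10 ≤ n := by omega
      have hlt : n / 10 < f := by omega
      rw [ih (n / 10) _ hlt]
      rw [Nat.log_of_one_lt_of_le (by norm_num) h10]
      simp only [List.length_cons]
      omega

theorem pvStrLen_eq (a : Int) (ha : 1 ≤ a) :
    PySem.Str.len (PySem.Int.toStr a) = ((Nat.log 10 a.toNat + 1 : Nat) : Int) := by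
  have h1 : PySem.Str.len (PySem.Int.toStr a) = ((PySem.Int.toStr a).toList.length : Int) := rfl
  rw [h1, PySem.Int.toList_toStr]
  unfold PySem.Int.toChars
  rw [if_neg (by omega)]
  unfold Nat.toDigits
  rw [pvTdcLen _ _ _ (Nat.lt_succ_self _)]
  simp

theorem pvIsBr_iff (n : Int) :
    pvIsBrilliant n = true ↔ ∃ a b : Int, IntPrime a ∧ IntPrime b ∧ a ≤ b ∧ a * b = n ∧
      Nat.log 10 a.toNat = Nat.log 10 b.toNat := by
  by_cases h2 : n < 2
  · apply iff_of_false
    · unfold pvIsBrilliant pvFactorTwo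
      rw [if_pos h2]
      simp
    · rintro ⟨a, b, ha, hb, _, hab, _⟩
      nlinarith [ha.1, hb.1]
  · rw [not_lt] at h2
    rcases pvFactorTwo_char n h2 with ⟨a, b, hft, ha, hb, hab, habn, _⟩ | ⟨hft, hO⟩
    · unfold pvIsBrilliant
      rw [hft]
      show (PySem.Str.len (PySem.Int.toStr a) == PySem.Str.len (PySem.Int.toStr b)) = true ↔ _
      rw [pvStrLen_eq a (by linarith [ha.1]), pvStrLen_eq b (by linarith [hb.1])]
      simp only [beq_iff_eq, Nat.cast_inj]
      constructor
      · intro h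
        exact ⟨a, b, ha, hb, hab, habn, by omega⟩
      · rintro ⟨c, d, hc, hd, hcd, hcdn, hlog⟩
        obtain ⟨rfl, rfl⟩ := pvSemiUnique c d a b hc hd ha hb hcd hab (by rw [habn, hcdn])
        omega
    · apply iff_of_false
      · unfold pvIsBrilliant
        rw [hft]
        simp
      · rintro ⟨a, b, ha, hb, hab, habn, _⟩
        apply hO
        rw [← habn, pvOmega_mul a b (by linarith [ha.1]) (by linarith [hb.1]),
          pvOmega_prime a ha, pvOmega_prime b hb]



-- ---- correctness of B's primality test ----

theorem pvPrimeLoop_of_prime (n : Int) (h2 : 2 ≤ n) (hp : n.toNat.Prime) :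
    ∀ (fuel : Nat) (f : Int), 3 ≤ f → pvPrimeLoop fuel n f = true := by
  intro fuel
  induction fuel with
  | zero => intro f hf; rfl
  | succ fuel ih =>
    intro f hf
    rw [pvPrimeLoop]
    by_cases hfn : f * f ≤ n
    · rw [if_pos hfn]
      by_cases hm : PySem.Int.mod n f = 0
      · rw [if_pos hm]
        exfalso
        have hdvd : f ∣ n := (PySem.Int.mod_eq_zero_iff_dvd n f).mp hm
        have hdvd' : f.toNat ∣ n.toNat := by
          have h1 : ((f.toNat : Int)) = f := by omega
          have h2' : ((n.toNat : Int)) = n := by omega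
          rw [← h1, ← h2'] at hdvd
          exact_mod_cast hdvd
        rcases (Nat.Prime.eq_one_or_self_of_dvd hp _ hdvd') with h1 | h1
        · omega
        · have hfe : f = n := by omega
          rw [hfe] at hfn
          nlinarith
      · rw [if_neg hm]
        exact ih (f + 2) (by omega)
    · rw [if_neg hfn]

theorem pvIsPrime_of_prime (n : Int) (h2 : 2 ≤ n) (hp : n.toNat.Prime) : pvIsPrime n = true := by
  unfold pvIsPrime
  rw [if_neg (by omega)]
  by_cases hm : PySem.Int.mod n 2 = 0
  · rw [if_pos hm]
    have hdvd : 2 ∣ n := (PySem.Int.mod_eq_zero_iff_dvd n 2).mp hm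
    have hdvd' : 2 ∣ n.toNat := by
      have h2' : ((n.toNat : Int)) = n := by omega
      rw [← h2'] at hdvd
      exact_mod_cast hdvd
    have := (Nat.Prime.eq_one_or_self_of_dvd hp _ hdvd')
    have : n = 2 := by omega
    simp [this]
  · rw [if_neg hm]
    exact pvPrimeLoop_of_prime n h2 hp n.toNat 3 (by omega)

theorem pvPrimeLoop_sound (n : Int) :
    ∀ (fuel : Nat) (f : Int), 3 ≤ f → f % 2 = 1 → n - f < (fuel : Int) →
    pvPrimeLoop fuel n f = true →
    ∀ g : Int, f ≤ g → g % 2 = 1 → g * g ≤ n → ¬ (g ∣ n) := by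
  intro fuel
  induction fuel with
  | zero =>
    intro f hf hfo hfl _ g hfg hgo hgn hgd
    simp only [Nat.cast_zero] at hfl
    nlinarith
  | succ fuel ih =>
    intro f hf hfo hfl h g hfg hgo hgn hgd
    rw [pvPrimeLoop] at h
    by_cases hfn : f * f ≤ n
    · rw [if_pos hfn] at h
      by_cases hm : PySem.Int.mod n f = 0
      · rw [if_pos hm] at h
        exact absurd h (by simp)
      · rw [if_neg hm] at h
        rcases eq_or_lt_of_le hfg with heq | hlt
        · subst heq
          exact hm ((PySem.Int.mod_eq_zero_iff_dvd n f).mpr hgd)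
        · exact ih (f + 2) (by omega) (by omega) (by push_cast at hfl ⊢; omega) h g
            (by omega) hgo hgn hgd
    · nlinarith

theorem pvIsPrime_iff (a : Int) : pvIsPrime a = true ↔ IntPrime a := by
  constructor
  · intro h
    unfold pvIsPrime at h
    by_cases h2 : a < 2
    · rw [if_pos h2] at h
      exact absurd h (by simp)
    · rw [if_neg h2] at h
      rw [not_lt] at h2
      by_cases hm : PySem.Int.mod a 2 = 0
      · rw [if_pos hm] at h
        have ha2 : a = 2 := by simpa using h
        subst ha2
        exact ⟨le_refl _, Nat.prime_two⟩
      · rw [if_neg hm] at h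
        refine ⟨h2, ?_⟩
        by_contra hc
        have hm2 : 2 ≤ a.toNat := by omega
        have hr := Nat.minFac_prime (show a.toNat ≠ 1 by omega)
        have htwo := hr.two_le
        have hrd := Nat.minFac_dvd a.toNat
        have hsq := Nat.minFac_sq_le_self (show 0 < a.toNat by omega) hc
        have hr2 : a.toNat.minFac ≠ 2 := by
          intro he
          apply hm
          rw [PySem.Int.mod_eq_zero_iff_dvd]
          have hd2 : ((2 : Nat) : Int) ∣ ((a.toNat : Nat) : Int) :=
            Int.natCast_dvd_natCast.mpr (he ▸ hrd)
          have he2 : ((a.toNat : Nat) : Int) = a := by omega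
          rw [he2] at hd2
          exact_mod_cast hd2
        have hro : a.toNat.minFac % 2 = 1 := Nat.odd_iff.mp (hr.odd_of_ne_two hr2)
        have hsqle : (a.toNat.minFac : Int) * (a.toNat.minFac : Int) ≤ a := by
          have h1 : a.toNat.minFac * a.toNat.minFac ≤ a.toNat := by nlinarith
          have h2' := Int.ofNat_le.mpr h1
          push_cast at h2'
          omega
        have hdvd : (a.toNat.minFac : Int) ∣ a := by
          have h2' := Int.natCast_dvd_natCast.mpr hrd
          have he2 : ((a.toNat : Nat) : Int) = a := by omega
          rw [he2] at h2'
          exact h2'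
        exact pvPrimeLoop_sound a a.toNat 3 (by omega) (by omega) (by omega) h
          (a.toNat.minFac : Int) (by omega) (by omega) hsqle hdvd
  · intro h
    exact pvIsPrime_of_prime a h.1 h.2

-- … and every digit-length block contains a prime (Bertrand), so each pvLoopB
-- iteration appends a nonempty product block
theorem pvBlockPrimes_ne_nil (d : Int) (hd : 1 ≤ d) :
    ((PySem.List.pyRange (if d == 1 then 2 else 10 ^ (d - 1).toNat) (10 ^ d.toNat) 1).filter pvIsPrime) ≠ [] := by
  by_cases hd : d = 1
  · subst hd
    apply List.ne_nil_of_mem (a := (2 : Int))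
    rw [List.mem_filter]
    constructor
    · simp [PySem.List.mem_pyRange_one]
    · decide
  · have hd2 : 2 ≤ d := by omega
    obtain ⟨p, hp, hlt, hle⟩ := Nat.bertrand (10 ^ (d - 1).toNat) (by positivity)
    apply List.ne_nil_of_mem (a := (p : Int))
    rw [List.mem_filter]
    have hcast : ((10 ^ (d - 1).toNat : Nat) : Int) = (10 : Int) ^ (d - 1).toNat := by push_cast; ring
    have hdt : d.toNat = (d - 1).toNat + 1 := by omega
    constructor
    · rw [PySem.List.mem_pyRange_one]
      have hbeq : (d == 1) = false := by simp [hd]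
      rw [hbeq]
      simp only [Bool.false_eq_true, if_false]
      constructor
      · rw [← hcast]
        exact_mod_cast hlt.le
      · rw [hdt]
        have : p < 10 ^ ((d - 1).toNat + 1) := by
          have h1 : 1 ≤ 10 ^ (d - 1).toNat := Nat.one_le_pow _ _ (by omega)
          calc p ≤ 2 * 10 ^ (d - 1).toNat := hle
          _ < 10 ^ ((d - 1).toNat + 1) := by rw [pow_succ]; omega
        exact_mod_cast this
    · exact pvIsPrime_of_prime _ (by exact_mod_cast hp.two_le) (by simpa using hp)

theorem pvProds_ne_nil (primes : List Int) (h : primes ≠ []) : pvProds primes ≠ [] := by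
  unfold pvProds
  intro hnil
  have hperm := List.mergeSort_perm
    ((PySem.List.enumerate primes).flatMap
      (fun ip => (PySem.List.slice primes (some ip.1) none).map (fun q => ip.2 * q)))
    (fun a b => decide (a ≤ b))
  rw [hnil] at hperm
  have hemp := hperm.symm.eq_nil
  obtain ⟨a, t, rfl⟩ := List.exists_cons_of_ne_nil h
  rw [PySem.List.enumerate_cons, List.flatMap_cons] at hemp
  have hslice : PySem.List.slice (a :: t) (some (0 : Int)) none = a :: t := by
    simp [pysem]
  rw [hslice] at hemp
  simp at hemp

-- ---- B's same-digit-length prime pair products, characterised ----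

def pvPrimesD (d : Int) : List Int :=
  (PySem.List.pyRange (if d == 1 then 2 else 10 ^ (d - 1).toNat) (10 ^ d.toNat) 1).filter pvIsPrime

def pvRaw (l : List Int) : List Int :=
  (PySem.List.enumerate l).flatMap
    (fun ip => (PySem.List.slice l (some ip.1) none).map (fun q => ip.2 * q))

theorem pvProds_def (l : List Int) : pvProds l = (pvRaw l).mergeSort (fun a b => decide (a ≤ b)) := rfl

theorem pvMem_raw (l : List Int) (x : Int) :
    x ∈ pvRaw l ↔ ∃ (i : Nat) (_ : i < l.length), ∃ q ∈ l.drop i, x = l[i] * q := by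
  unfold pvRaw
  rw [List.mem_flatMap]
  constructor
  · rintro ⟨ip, hip, hx⟩
    obtain ⟨k, hk, rfl⟩ := (PySem.List.mem_enumerate_iff l 0 ip).mp hip
    rw [List.mem_map] at hx
    obtain ⟨q, hq, rfl⟩ := hx
    rw [PySem.List.slice_from l (by omega : (0 : Int) ≤ 0 + (k : Int))] at hq
    rw [show ((0 : Int) + (k : Int)).toNat = k from by omega] at hq
    exact ⟨k, hk, q, hq, rfl⟩
  · rintro ⟨i, hi, q, hq, rfl⟩
    refine ⟨((0 : Int) + (i : Int), l[i]), ?_, ?_⟩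
    · rw [PySem.List.mem_enumerate_iff]
      exact ⟨i, hi, rfl⟩
    · rw [List.mem_map]
      refine ⟨q, ?_, rfl⟩
      rw [PySem.List.slice_from l (by omega : (0 : Int) ≤ 0 + (i : Int))]
      rw [show ((0 : Int) + (i : Int)).toNat = i from by omega]
      exact hq

theorem pvMem_raw_pairs (l : List Int) (hpw : l.Pairwise (· < ·)) (x : Int) :
    x ∈ pvRaw l ↔ ∃ a ∈ l, ∃ b ∈ l, a ≤ b ∧ x = a * b := by
  rw [pvMem_raw]
  constructor
  · rintro ⟨i, hi, q, hq, rfl⟩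
    obtain ⟨j, hj, hjq⟩ := List.mem_drop_iff_getElem.mp hq
    refine ⟨l[i], List.getElem_mem _, q, ?_, ?_, rfl⟩
    · rw [← hjq]
      exact List.getElem_mem _
    · rw [← hjq]
      rcases Nat.eq_zero_or_pos j with rfl | hj0
      · simp
      · exact le_of_lt (List.pairwise_iff_getElem.mp hpw i (i + j) (by omega) (by omega) (by omega))
  · rintro ⟨a, ha, b, hb, hab, rfl⟩
    obtain ⟨i, hi, rfl⟩ := List.getElem_of_mem ha
    obtain ⟨j, hj, rfl⟩ := List.getElem_of_mem hb
    have hij : i ≤ j := by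
      by_contra hc
      have := List.pairwise_iff_getElem.mp hpw j i hj hi (by omega)
      omega
    refine ⟨i, hi, l[j], ?_, rfl⟩
    rw [List.mem_drop_iff_getElem]
    exact ⟨j - i, by omega, by simp only [show i + (j - i) = j from by omega]⟩

theorem pvNodup_raw (l : List Int) (hpw : l.Pairwise (· < ·)) (hall : ∀ a ∈ l, IntPrime a) :
    (pvRaw l).Nodup := by
  have hnd : l.Nodup := hpw.imp (fun h => ne_of_lt h)
  unfold pvRaw
  rw [List.nodup_flatMap]
  constructor
  · intro ip hip
    obtain ⟨k, hk, rfl⟩ := (PySem.List.mem_enumerate_iff l 0 ip).mp hip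
    rw [PySem.List.slice_from l (by omega : (0 : Int) ≤ 0 + (k : Int))]
    rw [show ((0 : Int) + (k : Int)).toNat = k from by omega]
    apply List.Nodup.map
    · intro a b hab
      have hp : (2 : Int) ≤ l[k] := (hall _ (List.getElem_mem _)).1
      exact mul_left_cancel₀ (by omega) hab
    · exact List.Pairwise.sublist (List.drop_sublist _ _) hnd
  · rw [List.pairwise_iff_getElem]
    intro i j hi hj hij
    rw [PySem.List.length_enumerate] at hi hj
    have hgi : (PySem.List.enumerate l 0)[i] = ((0 : Int) + (i : Int), l[i]) := by
      rw [PySem.List.getElem_enumerate]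
    have hgj : (PySem.List.enumerate l 0)[j] = ((0 : Int) + (j : Int), l[j]) := by
      rw [PySem.List.getElem_enumerate]
    rw [hgi, hgj]
    intro x hx1 hx2
    simp only at hx1 hx2
    rw [PySem.List.slice_from l (by omega : (0 : Int) ≤ 0 + (i : Int)),
      show ((0 : Int) + (i : Int)).toNat = i from by omega] at hx1
    rw [PySem.List.slice_from l (by omega : (0 : Int) ≤ 0 + (j : Int)),
      show ((0 : Int) + (j : Int)).toNat = j from by omega] at hx2
    rw [List.mem_map] at hx1 hx2
    obtain ⟨q1, hq1, hxe1⟩ := hx1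
    obtain ⟨q2, hq2, hxe2⟩ := hx2
    have hq1m : q1 ∈ l := List.mem_of_mem_drop hq1
    have hq2m : q2 ∈ l := List.mem_of_mem_drop hq2
    have hle1 : l[i] ≤ q1 := by
      obtain ⟨j1, hj1, hjq⟩ := List.mem_drop_iff_getElem.mp hq1
      rw [← hjq]
      rcases Nat.eq_zero_or_pos j1 with rfl | hj0
      · simp
      · exact le_of_lt (List.pairwise_iff_getElem.mp hpw i (i + j1) (by omega) (by omega) (by omega))
    have hle2 : l[j] ≤ q2 := by
      obtain ⟨j2, hj2, hjq⟩ := List.mem_drop_iff_getElem.mp hq2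
      rw [← hjq]
      rcases Nat.eq_zero_or_pos j2 with rfl | hj0
      · simp
      · exact le_of_lt (List.pairwise_iff_getElem.mp hpw j (j + j2) (by omega) (by omega) (by omega))
    have hlt : l[i] < l[j] := List.pairwise_iff_getElem.mp hpw i j hi hj hij
    have heq : l[i] * q1 = l[j] * q2 := by rw [hxe1, hxe2]
    obtain ⟨h1, _⟩ := pvSemiUnique l[i] q1 l[j] q2 (hall _ (List.getElem_mem _))
      (hall _ hq1m) (hall _ (List.getElem_mem _)) (hall _ hq2m) hle1 hle2 heq
    omega

-- ---- digit-length blocks as ranges ----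

theorem pvLogRange (a : Int) (ha : 2 ≤ a) (m : Nat) :
    ((10 : Int) ^ m ≤ a ∧ a < (10 : Int) ^ (m + 1)) ↔ Nat.log 10 a.toNat = m := by
  have hc : ∀ t : Nat, ((10 : Int) ^ t) = ((10 ^ t : Nat) : Int) := by intro t; push_cast; ring
  constructor
  · rintro ⟨h1, h2⟩
    apply Nat.log_eq_of_pow_le_of_lt_pow
    · rw [hc] at h1; omega
    · rw [hc] at h2; omega
  · intro h
    have h1 := Nat.pow_log_le_self 10 (show a.toNat ≠ 0 by omega)
    have h2 := Nat.lt_pow_succ_log_self (show 1 < 10 by norm_num) a.toNat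
    rw [h] at h1 h2
    rw [hc, hc]
    omega

theorem pvMem_primesD (d : Int) (hd : 1 ≤ d) (a : Int) :
    a ∈ pvPrimesD d ↔ IntPrime a ∧ Nat.log 10 a.toNat = (d - 1).toNat := by
  unfold pvPrimesD
  rw [List.mem_filter, PySem.List.mem_pyRange_one, pvIsPrime_iff]
  by_cases hd1 : d = 1
  · subst hd1
    rw [show ((1 : Int) == 1) = true from rfl]
    simp only [if_true]
    rw [show (10 : Int) ^ (1 : Int).toNat = 10 from by norm_num]
    constructor
    · rintro ⟨⟨h2a, h10⟩, hpa⟩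
      refine ⟨hpa, ?_⟩
      rw [show ((1 : Int) - 1).toNat = 0 from rfl]
      exact Nat.log_of_lt (by omega)
    · rintro ⟨hpa, hlog⟩
      rw [show ((1 : Int) - 1).toNat = 0 from rfl] at hlog
      have h2 := Nat.lt_pow_succ_log_self (show 1 < 10 by norm_num) a.toNat
      rw [hlog] at h2
      simp only [pow_one] at h2
      exact ⟨⟨hpa.1, by omega⟩, hpa⟩
  · have hd2 : 2 ≤ d := by omega
    rw [show (d == 1) = false from by simp [hd1]]
    simp only [Bool.false_eq_true, if_false]
    have hM : d.toNat = (d - 1).toNat + 1 := by omega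
    constructor
    · rintro ⟨⟨hlo, hhi⟩, hpa⟩
      have h2a : 2 ≤ a := hpa.1
      refine ⟨hpa, ?_⟩
      rw [← pvLogRange a h2a ((d - 1).toNat)]
      rw [hM] at hhi
      exact ⟨hlo, hhi⟩
    · rintro ⟨hpa, hlog⟩
      obtain ⟨hlo, hhi⟩ := (pvLogRange a hpa.1 ((d - 1).toNat)).mpr hlog
      rw [hM]
      exact ⟨⟨hlo, hhi⟩, hpa⟩

def pvBlockLo (d : Int) : Int := if d == 1 then 2 else 10 ^ (2 * (d - 1).toNat)

theorem pvPrimesD_pairwise (d : Int) : (pvPrimesD d).Pairwise (· < ·) :=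
  (PySem.List.pairwise_lt_pyRange_one _ _).filter _

theorem pvPrimesD_prime (d : Int) (hd : 1 ≤ d) : ∀ a ∈ pvPrimesD d, IntPrime a :=
  fun a ha => ((pvMem_primesD d hd a).mp ha).1

theorem pvTenPow_mono (s t : Nat) (h : s ≤ t) : ((10 : Int) ^ s) ≤ 10 ^ t :=
  pow_le_pow_right₀ (by norm_num) h

theorem pvMem_raw_block (d : Int) (hd : 1 ≤ d) (x : Int) :
    x ∈ pvRaw (pvPrimesD d) ↔
      (pvIsBrilliant x = true ∧ pvBlockLo d ≤ x ∧ x < (10 : Int) ^ (2 * d.toNat)) := by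
  rw [pvMem_raw_pairs _ (pvPrimesD_pairwise d)]
  have hM : d.toNat = (d - 1).toNat + 1 := by omega
  constructor
  · rintro ⟨a, ha, b, hb, hab, rfl⟩
    obtain ⟨hpa, hla⟩ := (pvMem_primesD d hd a).mp ha
    obtain ⟨hpb, hlb⟩ := (pvMem_primesD d hd b).mp hb
    obtain ⟨ha1, ha2⟩ := (pvLogRange a hpa.1 _).mpr hla
    obtain ⟨hb1, hb2⟩ := (pvLogRange b hpb.1 _).mpr hlb
    have h2a := hpa.1
    have h2b := hpb.1
    refine ⟨(pvIsBr_iff _).mpr ⟨a, b, hpa, hpb, hab, rfl, by omega⟩, ?_, ?_⟩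
    · unfold pvBlockLo
      by_cases hd1 : d = 1
      · subst hd1
        rw [show ((1 : Int) == 1) = true from rfl]
        simp only [if_true]
        nlinarith
      · rw [show (d == 1) = false from by simp [hd1]]
        simp only [Bool.false_eq_true, if_false]
        rw [two_mul, pow_add]
        have hp0 : (0 : Int) ≤ 10 ^ (d - 1).toNat := by positivity
        exact mul_le_mul ha1 hb1 (by omega) (by omega)
    · rw [hM, show 2 * ((d - 1).toNat + 1) = ((d - 1).toNat + 1) + ((d - 1).toNat + 1) from by ring,
        pow_add]
      exact mul_lt_mul'' ha2 hb2 (by omega) (by omega)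
  · rintro ⟨hbr, hlo, hhi⟩
    obtain ⟨a, b, hpa, hpb, hab, habn, hlog⟩ := (pvIsBr_iff x).mp hbr
    subst habn
    set m := Nat.log 10 a.toNat with hm
    obtain ⟨ha1, ha2⟩ := (pvLogRange a hpa.1 m).mpr rfl
    obtain ⟨hb1, hb2⟩ := (pvLogRange b hpb.1 m).mpr hlog.symm
    have h2a := hpa.1
    have h2b := hpb.1
    have hmM : m = (d - 1).toNat := by
      by_contra hne
      rcases lt_or_gt_of_ne hne with hlt | hgt
      · -- m + 1 ≤ (d-1).toNat: product below the block
        have hup : a * b < (10 : Int) ^ (2 * (d - 1).toNat) := by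
          have h1 : a * b < 10 ^ (m + 1) * 10 ^ (m + 1) := mul_lt_mul'' ha2 hb2 (by omega) (by omega)
          have h2 : ((10 : Int) ^ (m + 1)) * 10 ^ (m + 1) = 10 ^ (2 * (m + 1)) := by
            ring

          have h3 := pvTenPow_mono (2 * (m + 1)) (2 * (d - 1).toNat) (by omega)
          omega
        have hd1 : d ≠ 1 := by
          intro h1
          subst h1
          omega
        unfold pvBlockLo at hlo
        rw [show (d == 1) = false from by simp [hd1]] at hlo
        simp only [Bool.false_eq_true, if_false] at hlo
        omega
      · -- (d-1).toNat < m: product above the block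
        have hdown : (10 : Int) ^ (2 * d.toNat) ≤ a * b := by
          have h1 : (10 : Int) ^ m * 10 ^ m ≤ a * b := mul_le_mul ha1 hb1 (by omega) (by omega)
          have h2 : ((10 : Int) ^ m) * 10 ^ m = 10 ^ (2 * m) := by ring
          have h3 := pvTenPow_mono (2 * d.toNat) (2 * m) (by omega)
          omega
        omega
    refine ⟨a, (pvMem_primesD d hd a).mpr ⟨hpa, by omega⟩, b,
      (pvMem_primesD d hd b).mpr ⟨hpb, by omega⟩, hab, rfl⟩

theorem pvProds_eq_filter (d : Int) (hd : 1 ≤ d) :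
    pvProds (pvPrimesD d) =
      (PySem.List.pyRange (pvBlockLo d) ((10 : Int) ^ (2 * d.toNat)) 1).filter pvIsBrilliant := by
  rw [pvProds_def]
  have hperm : ((PySem.List.pyRange (pvBlockLo d) ((10 : Int) ^ (2 * d.toNat)) 1).filter
      pvIsBrilliant).Perm (pvRaw (pvPrimesD d)) := by
    rw [List.perm_ext_iff_of_nodup
      ((PySem.List.nodup_pyRange_one _ _).filter _)
      (pvNodup_raw _ (pvPrimesD_pairwise d) (pvPrimesD_prime d hd))]
    intro y
    rw [List.mem_filter, PySem.List.mem_pyRange_one, pvMem_raw_block d hd y]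
    tauto
  refine List.Perm.eq_of_pairwise (le := (· ≤ ·)) (fun a b _ _ h1 h2 => le_antisymm h1 h2)
    ?_ ?_ ((List.mergeSort_perm _ _).trans hperm.symm)
  · exact List.pairwise_mergeSort' (· ≤ ·) _
  · exact ((PySem.List.pairwise_lt_pyRange_one _ _).filter _).imp (fun h => le_of_lt h)

-- ---- the scanned prefix lists ----

def pvF (d : Int) : List Int :=
  (PySem.List.pyRange 2 ((10 : Int) ^ (2 * d.toNat)) 1).filter pvIsBrilliant

theorem pvF_zero : pvF 0 = [] := by
  unfold pvF
  rw [PySem.List.pyRange_one_eq_nil (by norm_num)]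
  rfl

theorem pvF_succ (d : Int) (hd : 1 ≤ d) : pvF d = pvF (d - 1) ++ pvProds (pvPrimesD d) := by
  rw [pvProds_eq_filter d hd]
  by_cases hd1 : d = 1
  · subst hd1
    rw [show (1 : Int) - 1 = 0 from rfl, pvF_zero]
    unfold pvF pvBlockLo
    rw [show ((1 : Int) == 1) = true from rfl]
    simp only [if_true]
    rw [List.nil_append]
  · have hd2 : 2 ≤ d := by omega
    unfold pvF pvBlockLo
    rw [show (d == 1) = false from by simp [hd1]]
    simp only [Bool.false_eq_true, if_false]
    have hmid : (2 : Int) ≤ 10 ^ (2 * (d - 1).toNat) := by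
      have := pvTenPow_mono 1 (2 * (d - 1).toNat) (by omega)
      simp only [pow_one] at this
      omega
    have hhi : (10 : Int) ^ (2 * (d - 1).toNat) ≤ 10 ^ (2 * d.toNat) :=
      pvTenPow_mono _ _ (by omega)
    rw [PySem.List.pyRange_one_append 2 (10 ^ (2 * (d - 1).toNat)) (10 ^ (2 * d.toNat)) hmid hhi]
    rw [List.filter_append]

-- ---- the two search loops, and the fuel bounds their callers pass ----

theorem pvLoopA_spec (count : Int) :
    ∀ (fuel : Nat) (n : Int) (out : List Int),
    count ≤ out.length +
      ((PySem.List.pyRange (n + 1) (n + 1 + (fuel : Int)) 1).filter pvIsBrilliant).length →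
    pvLoopA fuel count out n =
      out ++ ((PySem.List.pyRange (n + 1) (n + 1 + (fuel : Int)) 1).filter pvIsBrilliant).take
        ((count - out.length).toNat) := by
  intro fuel
  induction fuel with
  | zero =>
    intro n out hc
    rw [PySem.List.pyRange_one_eq_nil (by push_cast; omega)] at hc ⊢
    simp only [List.filter_nil, List.length_nil, Nat.cast_zero, add_zero] at hc
    rw [pvLoopA]
    simp
  | succ fuel ih =>
    intro n out hc
    have hnN : n + 1 < n + 1 + ((fuel + 1 : Nat) : Int) := by push_cast; omega
    rw [PySem.List.pyRange_one_cons hnN] at hc ⊢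
    have hend : n + 1 + ((fuel + 1 : Nat) : Int) = (n + 1) + 1 + (fuel : Int) := by
      push_cast; ring
    rw [hend] at hc ⊢
    rw [List.filter_cons] at hc ⊢
    rw [pvLoopA]
    by_cases hlt : (out.length : Int) < count
    · rw [if_pos hlt]
      by_cases hb : pvIsBrilliant (n + 1) = true
      · rw [if_pos hb]
        rw [if_pos hb] at hc ⊢
        rw [ih (n + 1) (out ++ [n + 1]) (by
          simp only [List.length_append, List.length_cons, List.length_nil] at hc ⊢
          push_cast at hc ⊢
          omega)]
        rw [show (count - (out.length : Int)).toNat =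
          (count - ((out ++ [n + 1]).length : Int)).toNat + 1 from by
            simp only [List.length_append, List.length_cons, List.length_nil]
            push_cast
            omega]
        rw [List.take_succ_cons]
        simp [List.append_assoc]
      · rw [if_neg hb]
        rw [if_neg hb] at hc ⊢
        exact ih (n + 1) out (by omega)
    · rw [if_neg hlt]
      rw [show (count - (out.length : Int)).toNat = 0 from by omega]
      simp

theorem pvLoopB_spec (count : Int) :
    ∀ (fuel : Nat) (d : Int), 1 ≤ d →
    count.toNat ≤ (pvF (d - 1)).length + fuel →
    ∃ E : Int, 0 ≤ E ∧ pvLoopB fuel count (pvF (d - 1)) d = pvF E ∧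
      count.toNat ≤ (pvF E).length := by
  intro fuel
  induction fuel with
  | zero =>
    intro d hd hc
    exact ⟨d - 1, by omega, by rw [pvLoopB], by omega⟩
  | succ fuel ih =>
    intro d hd hc
    by_cases hlt : ((pvF (d - 1)).length : Int) < count
    · rw [pvLoopB, if_pos hlt]
      have harg : pvF (d - 1) ++ pvProds ((PySem.List.pyRange
          (if d == 1 then 2 else 10 ^ (d - 1).toNat) (10 ^ d.toNat) 1).filter pvIsPrime) =
          pvF d := (pvF_succ d hd).symm
      have hgrow : (pvF (d - 1)).length + 1 ≤ (pvF d).length := by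
        rw [pvF_succ d hd, List.length_append]
        have hne : pvPrimesD d ≠ [] := pvBlockPrimes_ne_nil d hd
        have := List.length_pos_of_ne_nil (pvProds_ne_nil _ hne)
        omega
      obtain ⟨E, hE0, hEq, hElen⟩ := ih (d + 1) (by omega)
        (by rw [show d + 1 - 1 = d from by ring]; omega)
      rw [show d + 1 - 1 = d from by ring] at hEq
      refine ⟨E, hE0, ?_, hElen⟩
      rw [harg]
      exact hEq
    · refine ⟨d - 1, by omega, ?_, by omega⟩
      rw [pvLoopB, if_neg hlt]

theorem pvF_len : ∀ (k : Nat), (k : Int) ≤ ((pvF (k : Int)).length : Int) := by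
  intro k
  induction k with
  | zero => simp [pvF_zero]
  | succ k ih =>
    have hd : (1 : Int) ≤ ((k + 1 : Nat) : Int) := by push_cast; omega
    have hsub : ((k + 1 : Nat) : Int) - 1 = (k : Int) := by push_cast; ring
    rw [pvF_succ _ hd, hsub, List.length_append]
    have hne : pvPrimesD ((k + 1 : Nat) : Int) ≠ [] := pvBlockPrimes_ne_nil _ hd
    have hpos := List.length_pos_of_ne_nil (pvProds_ne_nil _ hne)
    push_cast at ih hpos ⊢
    omega

theorem pvF_prefix : ∀ (a : Int), 0 ≤ a → ∀ (k : Nat), pvF a <+: pvF (a + (k : Int)) := by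
  intro a ha k
  induction k with
  | zero => simpa using List.prefix_refl (pvF a)
  | succ k ih =>
    have hd : (1 : Int) ≤ a + ((k + 1 : Nat) : Int) := by push_cast; omega
    have hstep := pvF_succ (a + ((k + 1 : Nat) : Int)) hd
    rw [show a + ((k + 1 : Nat) : Int) - 1 = a + (k : Int) from by push_cast; ring] at hstep
    rw [hstep]
    exact ih.trans (List.prefix_append _ _)

theorem main_equiv : ∀ (count : Int), 1 ≤ count →
    brilliant_numbers count = brilliant_numbers_alt count := by
  intro count hc
  unfold brilliant_numbers brilliant_numbers_alt
  rw [if_neg (by omega)]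
  -- B's loop reaches some full prefix pvF E with at least `count` elements
  obtain ⟨E, hE0, hEq, hElen⟩ := pvLoopB_spec count count.toNat 1 (le_refl _) (by
    rw [show (1 : Int) - 1 = 0 from rfl, pvF_zero]
    simp)
  rw [show (1 : Int) - 1 = 0 from rfl, pvF_zero] at hEq
  rw [hEq]
  -- A's scan bound: pvF count already holds ≥ count brilliant numbers below 10^(2·count)
  have hcc : ((count.toNat : Nat) : Int) = count := by omega
  have hFlen : count.toNat ≤ (pvF count).length := by
    have h := pvF_len count.toNat
    rw [hcc] at h
    omega
  have h2N : (2 : Int) ≤ (10 : Int) ^ (2 * count.toNat) := by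
    have := pvTenPow_mono 1 (2 * count.toNat) (by omega)
    simp only [pow_one] at this
    omega
  have hsplit : PySem.List.pyRange 2 (2 + (10 : Int) ^ (2 * count.toNat)) 1
      = PySem.List.pyRange 2 ((10 : Int) ^ (2 * count.toNat)) 1 ++
        PySem.List.pyRange ((10 : Int) ^ (2 * count.toNat))
          (2 + (10 : Int) ^ (2 * count.toNat)) 1 :=
    PySem.List.pyRange_one_append 2 _ _ h2N (by omega)
  have hfold : (PySem.List.pyRange 2 ((10 : Int) ^ (2 * count.toNat)) 1).filter pvIsBrilliant
      = pvF count := rfl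
  have hA := pvLoopA_spec count (10 ^ (2 * count.toNat)) 1 []
  rw [show (1 : Int) + 1 + ((10 ^ (2 * count.toNat) : Nat) : Int)
      = 2 + (10 : Int) ^ (2 * count.toNat) from by push_cast; ring] at hA
  rw [show (1 : Int) + 1 = 2 from by norm_num] at hA
  rw [hA (by
    rw [hsplit, List.filter_append, List.length_append, hfold]
    simp only [List.length_nil, Nat.cast_zero, zero_add]
    push_cast
    omega)]
  rw [PySem.List.slice_to _ (by omega : (0 : Int) ≤ count)]
  rw [hsplit, List.filter_append, hfold]
  simp only [List.nil_append, List.length_nil, Nat.cast_zero, sub_zero]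
  -- both sides are `take count` of nested prefixes of the full brilliant sequence
  rcases le_total count E with hle | hle
  · obtain ⟨t, ht⟩ : pvF count <+: pvF E := by
      have h := pvF_prefix count (by omega) (E - count).toNat
      rw [show count + (((E - count).toNat : Nat) : Int) = E from by omega] at h
      exact h
    rw [← ht, List.take_append_of_le_length hFlen, List.take_append_of_le_length hFlen]
  · obtain ⟨t, ht⟩ : pvF E <+: pvF count := by
      have h := pvF_prefix E hE0 (count - E).toNat
      rw [show E + (((count - E).toNat : Nat) : Int) = count from by omega] at h
      exact h
    rw [← ht, List.append_assoc, List.take_append_of_le_length hElen]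

-- ===== VERDICT (by name: the statement is the Claim_ definition above) =====
theorem brilliant_numbers_spec : Claim_equal_brilliant_numbers := by
  intro count _ hpre
  unfold Spec_brilliant_numbers
  exact main_equiv count hpre
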